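-- pv_equiv track=rewrite | github.com/8080509/Permutation-Generators | SymmetricGroups3.py | magicPinGenFixedValeCR
-- ===== SOURCE A (Python) =====
-- def subsetIterComp(coll, k): #Iterates through the k-element subsets of a collection.
-- 	if k == 0:
-- 		yield [], coll
-- 		return
-- 	tCol = coll.copy()
-- 	pCol = []
-- 	for _ in range(k-1, len(tCol)):  # we want to select items from tCol, so long as what remains has at least k-1 entries.  This just makes it run the loop that many times.
-- 		x = tCol.pop()
-- 		for i, comp in subsetIterComp(tCol, k-1): #Iterates through subsets with one fewer element from the collection of items not yet used in this level.
-- 			i.append(x)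
-- 			yield i, pCol + comp
-- 		pCol.append(x)
--
-- def magicPinGenFixedValeCR(n, P, V, k = 0, given = [[]]):
-- 	if k == n:
-- 		return [val[0] for val in given]
-- 	if k in V:
-- 		res = [val + [(k,)] for val in given]
-- 	elif k in P:
-- 		res = [comp + [sub[0] + (k,) + sub[1]] for val in given for sub, comp in subsetIterComp(val, 2)]
-- 	else:
-- 		res = [comp + [sub[0] + (k,)] for val in given for sub, comp in subsetIterComp(val, 1)]
-- 	return magicPinGenFixedValeCR(n, P, V, k + 1, res)
-- ===== SOURCE B (Python) =====
-- def subsetIterComp(coll, k): #Iterates through the k-element subsets of a collection.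
-- 	if k == 0:
-- 		yield [], coll
-- 		return
-- 	tCol = coll.copy()
-- 	pCol = []
-- 	for _ in range(k-1, len(tCol)):
-- 		x = tCol.pop()
-- 		for i, comp in subsetIterComp(tCol, k-1):
-- 			i.append(x)
-- 			yield i, pCol + comp
-- 		pCol.append(x)
--
-- def _extendVal(P, V, kk, val):
-- 	if kk in V:
-- 		return [val + [(kk,)]]
-- 	m = 2 if kk in P else 1
-- 	out = []
-- 	for sub, comp in subsetIterComp(val, m):
-- 		t = sub[0] + (kk,) + (sub[1] if m == 2 else ())
-- 		out.append(comp + [t])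
-- 	return out
--
-- def magicPinGenFixedValeCR(n, P, V, k = 0, given = [[]]):
-- 	res = given
-- 	for kk in range(k, n):
-- 		res = [r for val in res for r in _extendVal(P, V, kk, val)]
-- 	return [val[0] for val in res]
-- ===== Notes on version B (the rewrite author's own statement) =====
-- stated objective: alternative
-- what changed: Replaces A's accumulator-passing tail recursion over k with an iterative fold over range(k, n), and unifies the three comprehension branches into one per-value extension helper (m = 2 if pinned else 1); the subset generator is kept unchanged; same cost, no speed claim.
import Mathlib
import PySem

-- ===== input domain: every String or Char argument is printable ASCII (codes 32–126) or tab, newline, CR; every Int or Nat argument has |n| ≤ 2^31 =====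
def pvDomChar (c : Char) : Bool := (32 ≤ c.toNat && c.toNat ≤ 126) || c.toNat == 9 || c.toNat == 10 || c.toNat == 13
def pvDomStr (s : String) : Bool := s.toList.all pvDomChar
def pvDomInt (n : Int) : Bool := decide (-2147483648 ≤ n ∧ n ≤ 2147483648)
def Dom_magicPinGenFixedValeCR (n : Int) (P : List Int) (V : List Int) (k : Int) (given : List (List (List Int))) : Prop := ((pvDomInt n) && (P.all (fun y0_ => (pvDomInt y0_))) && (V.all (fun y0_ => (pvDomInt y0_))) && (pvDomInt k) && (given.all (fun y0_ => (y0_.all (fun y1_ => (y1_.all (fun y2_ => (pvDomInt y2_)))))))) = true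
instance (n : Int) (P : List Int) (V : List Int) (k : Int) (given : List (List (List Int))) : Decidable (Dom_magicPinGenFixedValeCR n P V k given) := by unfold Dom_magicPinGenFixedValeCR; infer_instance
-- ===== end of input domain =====

-- ===== PORT A =====
-- B rewrites the tail recursion over k as an iterative fold over range(k, n) with a unified
-- per-value extension helper; objective: alternative decomposition, same cost (no speed claim).
-- Helper: literal port of the generator subsetIterComp (materialised as the list of its yields,
-- in yield order). Shared verbatim by both ports, since Source B keeps this helper unchanged.
def sicLoop (rec : List (List Int) → List (List (List Int) × List (List Int)))
    : Nat → List (List Int) → List (List Int) → List (List (List Int) × List (List Int))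
  | 0, _, _ => []
  | cnt + 1, tCol, pCol =>
    match tCol.getLast? with
    | none => []   -- unreachable: the loop count never exceeds the remaining length
    | some x =>
      let tCol' := tCol.dropLast
      ((rec tCol').map (fun ic => (ic.1 ++ [x], pCol ++ ic.2)))
        ++ sicLoop rec cnt tCol' (pCol ++ [x])

def subsetIterComp : Nat → List (List Int) → List (List (List Int) × List (List Int))
  | 0, coll => [([], coll)]
  | kk + 1, coll => sicLoop (subsetIterComp kk) (coll.length - kk) coll []

-- A's tail recursion, with fuel (n - k).toNat standing for the (terminating, inside Pre_)
-- descent on n - k; val[0] is ported as (pyGet? val 0).getD [] (Python raises on empty val,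
-- excluded by Pre_).
def magicPinAux (n : Int) (P V : List Int) : Nat → Int → List (List (List Int)) → List (List Int)
  | fuel, k, given =>
    if k = n then given.map (fun val => (PySem.List.pyGet? val 0).getD [])
    else
      match fuel with
      | 0 => []   -- unreachable inside Pre_ (k ≤ n)
      | fuel + 1 =>
        let res :=
          if V.contains k then
            given.map (fun val => val ++ [[k]])
          else if P.contains k then
            given.flatMap (fun val => (subsetIterComp 2 val).map (fun sc =>
              sc.2 ++ [((PySem.List.pyGet? sc.1 0).getD []) ++ [k] ++ ((PySem.List.pyGet? sc.1 1).getD [])]))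
          else
            given.flatMap (fun val => (subsetIterComp 1 val).map (fun sc =>
              sc.2 ++ [((PySem.List.pyGet? sc.1 0).getD []) ++ [k]]))
        magicPinAux n P V fuel (k + 1) res

def magicPinGenFixedValeCR (n : Int) (P : List Int) (V : List Int) (k : Int) (given : List (List (List Int))) : List (List Int) :=
  magicPinAux n P V (n - k).toNat k given

-- ===== PORT B =====
-- _extendVal from Source B: all successors of one val for pin kk (V / P-or-default unified via m).
def extendVal (P V : List Int) (kk : Int) (val : List (List Int)) : List (List (List Int)) :=
  if V.contains kk then [val ++ [[kk]]]
  else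
    let m : Nat := if P.contains kk then 2 else 1
    (subsetIterComp m val).map (fun sc =>
      sc.2 ++ [((PySem.List.pyGet? sc.1 0).getD []) ++ [kk] ++
        (if m = 2 then ((PySem.List.pyGet? sc.1 1).getD []) else [])])

def magicPinGenFixedValeCR_alt (n : Int) (P : List Int) (V : List Int) (k : Int) (given : List (List (List Int))) : List (List Int) :=
  (((PySem.List.pyRange k n 1).foldl (fun res kk => res.flatMap (extendVal P V kk)) given).map
    (fun val => (PySem.List.pyGet? val 0).getD []))

-- ===== PRECONDITION & SPEC =====
-- Pre_ excludes exactly the inputs where Python A raises: k > n (unbounded recursion,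
-- RecursionError) and k = n with an empty val in given (IndexError on val[0]).
def Pre_magicPinGenFixedValeCR (n : Int) (P : List Int) (V : List Int) (k : Int) (given : List (List (List Int))) : Prop :=
  k ≤ n ∧ (k = n → ∀ val ∈ given, val ≠ [])
instance (n : Int) (P : List Int) (V : List Int) (k : Int) (given : List (List (List Int))) : Decidable (Pre_magicPinGenFixedValeCR n P V k given) := by unfold Pre_magicPinGenFixedValeCR; infer_instance

def pvWitness_magicPinGenFixedValeCR : Int × List Int × List Int × Int × List (List (List Int)) :=
  (3, [1], [], 0, [[]])

def Spec_magicPinGenFixedValeCR (n : Int) (P : List Int) (V : List Int) (k : Int) (given : List (List (List Int))) (out : List (List Int)) : Prop := out = magicPinGenFixedValeCR_alt n P V k given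
instance (n : Int) (P : List Int) (V : List Int) (k : Int) (given : List (List (List Int))) (out : List (List Int)) : Decidable (Spec_magicPinGenFixedValeCR n P V k given out) := by unfold Spec_magicPinGenFixedValeCR; infer_instance

-- ===== CLAIM (what is proved, stated in full; the proofs are below) =====
def Claim_equal_magicPinGenFixedValeCR : Prop := ∀ (n : Int) (P : List Int) (V : List Int) (k : Int) (given : List (List (List Int))), Dom_magicPinGenFixedValeCR n P V k given → Pre_magicPinGenFixedValeCR n P V k given → Spec_magicPinGenFixedValeCR n P V k given (magicPinGenFixedValeCR n P V k given)

-- ===== LEMMAS AND PROOFS =====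
-- One fold step of B equals one recursion step of A.
lemma flatMap_extendVal (P V : List Int) (k : Int) (given : List (List (List Int))) :
    given.flatMap (extendVal P V k) =
      (if V.contains k then
        given.map (fun val => val ++ [[k]])
      else if P.contains k then
        given.flatMap (fun val => (subsetIterComp 2 val).map (fun sc =>
          sc.2 ++ [((PySem.List.pyGet? sc.1 0).getD []) ++ [k] ++ ((PySem.List.pyGet? sc.1 1).getD [])]))
      else
        given.flatMap (fun val => (subsetIterComp 1 val).map (fun sc =>
          sc.2 ++ [((PySem.List.pyGet? sc.1 0).getD []) ++ [k]]))) := by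
  unfold extendVal
  by_cases hV : k ∈ V <;> by_cases hP : k ∈ P <;>
    simp [hV, hP, List.flatMap] <;>
    induction given with
    | nil => simp
    | cons v vs ih => simp [ih]

lemma magicPinAux_eq_fold (P V : List Int) :
    ∀ (fuel : Nat) (n k : Int) (given : List (List (List Int))), n = k + fuel →
      magicPinAux n P V fuel k given =
        (((PySem.List.pyRange k n 1).foldl (fun res kk => res.flatMap (extendVal P V kk)) given).map
          (fun val => (PySem.List.pyGet? val 0).getD [])) := by
  intro fuel
  induction fuel with
  | zero =>
    intro n k given h
    simp at h
    subst h
    rw [magicPinAux]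
    simp [PySem.List.pyRange]
  | succ f ih =>
    intro n k given h
    have hk : k < n := by omega
    have hne : ¬ (k = n) := by omega
    rw [magicPinAux]
    rw [PySem.List.pyRange_one_cons hk]
    simp only [hne, if_false, List.foldl_cons]
    rw [ih n (k + 1) _ (by omega)]
    rw [flatMap_extendVal]

-- ===== VERDICT (by name: the statement is the Claim_ definition above) =====
theorem magicPinGenFixedValeCR_spec : Claim_equal_magicPinGenFixedValeCR := by
  intro n P V k given _ hpre
  obtain ⟨hk, -⟩ := hpre
  unfold Spec_magicPinGenFixedValeCR magicPinGenFixedValeCR magicPinGenFixedValeCR_alt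
  exact magicPinAux_eq_fold P V (n - k).toNat n k given (by omega)
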